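-- pv_equiv track=rewrite | github.com/stryder199/RyarkAssignments | Assignment2/web2py/applications/cqg/question/generate_util.py | generalize
-- ===== SOURCE A (Python) =====
-- def generalize(L,n):
-- 	'''
-- 	Purpose
-- 		return a list containing every generalization of L with exactly
-- 			n occurrences of None
-- 		where
-- 		G is a generalization of L if G can be obtained
-- 			from L by replacing one or more elements of L with None
-- 	Precondition
-- 		L is a list of string, float, or integer
-- 		n is a non-negative integer
-- 	'''
-- 	G_list = []
-- 	if n == 0:
-- 		G_list.append(L)
-- 	elif n == len(L):
-- 		G_list.append([None]*len(L))
-- 	else: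
-- 		for i in range(len(L)-n):
-- 			prefix = L[:i]
--
-- 			# add to G_list:
-- 			#	all generalizations with None in position i
-- 			for suffix in generalize(L[i+1:],n-1):
-- 				G = prefix + [None] + suffix
-- 				if G not in G_list:
-- 					G_list.append(G)
--
-- 			# add to G_list:
-- 			#	all generalizations with L[i] in position i
-- 			for suffix in generalize(L[i+1:],n): # with no None
-- 				G = prefix + [L[i]] + suffix
-- 				if G not in G_list:
-- 					G_list.append(G)
-- 	return G_list
-- ===== SOURCE B (Python) =====
-- def generalize(L, n):
--     # Head/tail structural recursion producing the same order directly,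
--     # with no duplicate generation and no membership scans.
--     if n == 0:
--         return [L]
--     if n > len(L):
--         return []
--     rest = L[1:]
--     return ([[None] + s for s in generalize(rest, n - 1)]
--             + [[L[0]] + s for s in generalize(rest, n)])
-- ===== Notes on version B (the rewrite author's own statement) =====
-- stated objective: simpler
-- what changed: Replaced A's index loop with prefix slices, re-generation of already-seen results and linear membership dedup scans over the output by a short duplicate-free head/tail recursion (None-on-head branch ++ keep-head branch) that emits each result exactly once in the same order.
import Mathlib
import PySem

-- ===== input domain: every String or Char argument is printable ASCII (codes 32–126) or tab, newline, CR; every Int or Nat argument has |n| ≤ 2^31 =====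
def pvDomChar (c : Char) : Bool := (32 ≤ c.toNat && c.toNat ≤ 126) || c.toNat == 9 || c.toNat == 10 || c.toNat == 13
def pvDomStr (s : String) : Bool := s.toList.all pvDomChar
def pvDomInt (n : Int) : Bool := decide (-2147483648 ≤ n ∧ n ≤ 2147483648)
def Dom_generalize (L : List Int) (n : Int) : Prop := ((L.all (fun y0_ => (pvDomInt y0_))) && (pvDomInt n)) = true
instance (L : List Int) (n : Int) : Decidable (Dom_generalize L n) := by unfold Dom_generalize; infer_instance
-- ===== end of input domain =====

-- B replaces A's index loop with slices, re-generation of already-seen results and membership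
-- dedup scans by a short duplicate-free head/tail recursion emitting each result once, same order (objective: simpler).

-- ===== PORT A =====
-- A's recursion never terminates for n < 0 (Python: RecursionError, outside Pre_); the fuel parameter
-- (L.length + 1) never runs out for n ≥ 0 since every recursive call drops at least one element.
def genFuelA : Nat → List Int → Int → List (List (Option Int))
  | 0, _, _ => []   -- fuel exhausted: only reachable where the Python diverges (n < 0)
  | fuel+1, L, n =>
    if n = 0 then [L.map some]
    else if n = (L.length : Int) then [List.replicate L.length none]
    else
      -- for i in range(len(L)-n): …
      (PySem.List.pyRange 0 ((L.length : Int) - n) 1).foldl (fun acc0 i =>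
        let pre := (PySem.List.slice L none (some i)).map some   -- prefix = L[:i]
        -- for suffix in generalize(L[i+1:], n-1): G = prefix+[None]+suffix; dedup-append
        let acc1 := (genFuelA fuel (PySem.List.slice L (some (i+1)) none) (n-1)).foldl
          (fun acc suffix =>
            if pre ++ none :: suffix ∈ acc then acc else acc ++ [pre ++ none :: suffix]) acc0
        -- for suffix in generalize(L[i+1:], n): G = prefix+[L[i]]+suffix; dedup-append
        (genFuelA fuel (PySem.List.slice L (some (i+1)) none) n).foldl
          (fun acc suffix =>
            if pre ++ (some (PySem.List.pyGetD L i 0)) :: suffix ∈ acc then acc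
            else acc ++ [pre ++ (some (PySem.List.pyGetD L i 0)) :: suffix]) acc1) []

def generalize (L : List Int) (n : Int) : List (List (Option Int)) :=
  genFuelA (L.length + 1) L n

-- ===== PORT B =====
def generalize_alt (L : List Int) (n : Int) : List (List (Option Int)) :=
  if n = 0 then [L.map some]
  else if n > (L.length : Int) then []
  else match L with
    | [] => []   -- unreachable on Pre_ (here n < 0, where the Python diverges)
    | x :: rest =>
      (generalize_alt rest (n-1)).map (none :: ·) ++ (generalize_alt rest n).map (some x :: ·)
termination_by L.length
decreasing_by all_goals simp_all [List.length_cons]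

-- ===== PRECONDITION & SPEC =====
-- Pre_ excludes n < 0, on which the Python A never returns (RecursionError from unbounded recursion).
def Pre_generalize (L : List Int) (n : Int) : Prop := 0 ≤ n
instance (L : List Int) (n : Int) : Decidable (Pre_generalize L n) := by unfold Pre_generalize; infer_instance
def pvWitness_generalize : List Int × Int := ([1, 2, 3], 1)

def Spec_generalize (L : List Int) (n : Int) (out : List (List (Option Int))) : Prop := out = generalize_alt L n
instance (L : List Int) (n : Int) (out : List (List (Option Int))) : Decidable (Spec_generalize L n out) := by unfold Spec_generalize; infer_instance

-- ===== CLAIM (what is proved, stated in full; the proofs are below) =====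
def Claim_equal_generalize : Prop := ∀ (L : List Int) (n : Int), Dom_generalize L n → Pre_generalize L n → Spec_generalize L n (generalize L n)

-- ===== LEMMAS AND PROOFS =====

-- unfolding equation for generalize_alt on a cons cell in the recursive case
theorem gen2_cons (x : Int) (rest : List Int) (n : Int) (h0 : n ≠ 0)
    (hle : ¬ n > ((x :: rest).length : Int)) :
    generalize_alt (x :: rest) n =
      (generalize_alt rest (n-1)).map (none :: ·) ++ (generalize_alt rest n).map (some x :: ·) := by
  rw [generalize_alt, if_neg h0, if_neg hle]

-- cast of a cons length, used to feed omega
theorem len_cons_int (x : Int) (rest : List Int) :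
    ((x :: rest).length : Int) = (rest.length : Int) + 1 := by
  push_cast [List.length_cons]; ring

-- B's output list has no duplicates
theorem gen2_nodup (L : List Int) (n : Int) (hn : 0 ≤ n) : (generalize_alt L n).Nodup := by
  induction L generalizing n with
  | nil =>
    rw [generalize_alt.eq_def]
    split_ifs <;> simp
  | cons x rest ih =>
    by_cases h0 : n = 0
    · subst h0; rw [generalize_alt]; simp
    by_cases hle : n > ((x :: rest).length : Int)
    · rw [generalize_alt, if_neg h0, if_pos hle]; simp
    rw [gen2_cons x rest n h0 hle]
    refine List.Nodup.append ?_ ?_ ?_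
    · exact (ih (n-1) (by omega)).map (fun a b h => by simpa using h)
    · exact (ih n hn).map (fun a b h => by simpa using h)
    · intro G h1 h2
      simp only [List.mem_map] at h1 h2
      obtain ⟨s1, _, rfl⟩ := h1
      obtain ⟨s2, _, h⟩ := h2
      simp at h

-- membership: prefix ++ [None] ++ suffix is already in B's output
theorem gen2_mem_none (i : Nat) (L : List Int) (n : Int) (s : List (Option Int))
    (hn : 1 ≤ n) (hi : (i : Int) < (L.length : Int) - n)
    (hs : s ∈ generalize_alt (L.drop (i+1)) (n-1)) :
    (L.take i).map some ++ none :: s ∈ generalize_alt L n := by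
  induction i generalizing L with
  | zero =>
    match L with
    | [] => simp at hi; omega
    | x :: rest =>
      have hL := len_cons_int x rest
      rw [gen2_cons x rest n (by omega) (by omega)]
      simp only [List.take_zero, List.map_nil, List.nil_append, List.mem_append, List.mem_map]
      exact Or.inl ⟨s, by simpa using hs, rfl⟩
  | succ i ih =>
    match L with
    | [] => simp at hi; omega
    | x :: rest =>
      have hL := len_cons_int x rest
      rw [gen2_cons x rest n (by omega) (by omega)]
      simp only [List.take_succ_cons, List.map_cons, List.cons_append, List.mem_append, List.mem_map]
      refine Or.inr ⟨(rest.take i).map some ++ none :: s, ?_, rfl⟩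
      exact ih rest (by push_cast at hi ⊢; omega) (by simpa using hs)

-- membership: prefix ++ [L[i]] ++ suffix is already in B's output
theorem gen2_mem_keep (i : Nat) (L : List Int) (n : Int) (s : List (Option Int))
    (hn : 1 ≤ n) (hi : (i : Int) < (L.length : Int) - n)
    (hs : s ∈ generalize_alt (L.drop (i+1)) n) :
    (L.take i).map some ++ some (L.getD i 0) :: s ∈ generalize_alt L n := by
  induction i generalizing L with
  | zero =>
    match L with
    | [] => simp at hi; omega
    | x :: rest =>
      have hL := len_cons_int x rest
      rw [gen2_cons x rest n (by omega) (by omega)]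
      simp only [List.take_zero, List.map_nil, List.nil_append, List.mem_append, List.mem_map]
      exact Or.inr ⟨s, by simpa using hs, by simp⟩
  | succ i ih =>
    match L with
    | [] => simp at hi; omega
    | x :: rest =>
      have hL := len_cons_int x rest
      rw [gen2_cons x rest n (by omega) (by omega)]
      simp only [List.take_succ_cons, List.map_cons, List.cons_append, List.mem_append, List.mem_map]
      refine Or.inr ⟨(rest.take i).map some ++ some (rest.getD i 0) :: s, ?_, by simp⟩
      exact ih rest (by push_cast at hi ⊢; omega) (by simpa using hs)

-- dedup-append fold when every new element is fresh: it is acc ++ map f ss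
theorem foldl_dedup_fresh {S T : Type} (g : List T → S → List T) (f : S → T)
    (hg : ∀ a s, f s ∉ a → g a s = a ++ [f s]) :
    ∀ (ss : List S) (acc : List T), (acc ++ ss.map f).Nodup →
    ss.foldl g acc = acc ++ ss.map f := by
  intro ss
  induction ss with
  | nil => simp
  | cons s rest ih =>
    intro acc h
    have hfresh : f s ∉ acc := fun hm =>
      (List.nodup_append.mp h).2.2 _ hm _ (by simp) rfl
    rw [List.foldl_cons, hg _ _ hfresh, ih (acc ++ [f s]) (by simpa [List.append_assoc] using h)]
    simp

-- dedup-append fold when every element is already present: acc is unchanged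
theorem foldl_dedup_absorb {S T : Type} (g : List T → S → List T) (f : S → T)
    (hg : ∀ a s, f s ∈ a → g a s = a) :
    ∀ (ss : List S) (acc : List T), (∀ s ∈ ss, f s ∈ acc) →
    ss.foldl g acc = acc := by
  intro ss
  induction ss with
  | nil => simp
  | cons s rest ih =>
    intro acc h
    rw [List.foldl_cons, hg _ _ (h s (by simp))]
    exact ih acc (fun t ht => h t (by simp [ht]))

-- a foldl whose step fixes acc on every element of the list
theorem foldl_fixed {S T : Type} (step : T → S → T) :
    ∀ (ss : List S) (acc : T), (∀ s ∈ ss, step acc s = acc) →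
    ss.foldl step acc = acc := by
  intro ss
  induction ss with
  | nil => simp
  | cons s rest ih =>
    intro acc h
    simp only [List.foldl_cons, h s (by simp)]
    exact ih acc (fun t ht => h t (by simp [ht]))

-- B on n = len(L): the single all-None generalization
theorem gen2_all_none (L : List Int) : generalize_alt L (L.length : Int) = [List.replicate L.length none] := by
  induction L with
  | nil => rw [generalize_alt.eq_def]; simp
  | cons x rest ih =>
    have hL := len_cons_int x rest
    rw [gen2_cons x rest _ (by omega) (by omega)]
    have h2 : generalize_alt rest (((x :: rest).length : Int)) = [] := by
      rw [generalize_alt.eq_def, if_neg (by omega), if_pos (by omega)]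
    have h1 : ((x :: rest).length : Int) - 1 = (rest.length : Int) := by omega
    rw [h1, ih, h2]
    simp [List.replicate_succ]

-- the main equivalence: fuel port of A equals B, for n ≥ 0, with enough fuel
theorem genFuelA_eq : ∀ (fuel : Nat) (L : List Int) (n : Int), 0 ≤ n → L.length < fuel →
    genFuelA fuel L n = generalize_alt L n := by
  intro fuel
  induction fuel with
  | zero => intro L n _ h; omega
  | succ fuel ih =>
    intro L n hn hfuel
    by_cases h0 : n = 0
    · subst h0; rw [genFuelA, generalize_alt.eq_def]; simp
    by_cases heq : n = (L.length : Int)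
    · rw [genFuelA]
      simp only [if_neg h0, if_pos heq]
      rw [heq, gen2_all_none]
    -- else branch of A
    rw [genFuelA]
    simp only [if_neg h0, if_neg heq]
    by_cases hbig : (L.length : Int) < n
    · -- loop range empty; B returns []
      rw [PySem.List.pyRange_one_eq_nil (by omega)]
      rw [generalize_alt.eq_def, if_neg h0, if_pos (show n > (L.length : Int) by omega)]
      rfl
    -- now 1 ≤ n < L.length, so L is nonempty
    have hn1 : 1 ≤ n := by omega
    have hlen : n < (L.length : Int) := by omega
    match L, heq, hbig, hfuel, hlen with
    | [], _, _, _, hlen => simp at hlen; omega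
    | x :: rest, heq, hbig, hfuel, hlen =>
    have hL := len_cons_int x rest
    have hrest : rest.length < fuel := by simp at hfuel; omega
    have hdrop : ∀ (k : Nat), ((x :: rest).drop (k+1)).length < fuel := by
      intro k
      simp only [List.drop_succ_cons]
      calc (rest.drop k).length ≤ rest.length := by simp
        _ < fuel := hrest
    have hsl1 : PySem.List.slice (x :: rest) (some ((0:Int)+1)) none = rest := by
      norm_num [PySem.List.slice_from_one]
    have hsl0 : PySem.List.slice (x :: rest) none (some (0:Int)) = ([] : List Int) := by
      rw [PySem.List.slice_to _ (by omega : (0:Int) ≤ 0)]; rfl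
    have hcons := gen2_cons x rest n h0 (by omega)
    have hnd : (generalize_alt (x :: rest) n).Nodup := gen2_nodup _ _ hn
    rw [PySem.List.pyRange_one_cons (by omega), List.foldl_cons]
    simp only [hsl0, hsl1, List.map_nil, List.nil_append, PySem.List.pyGetD_zero_cons,
      ih rest (n-1) (by omega) hrest, ih rest n hn hrest]
    -- the i = 0 step builds exactly generalize_alt (x :: rest) n
    rw [foldl_dedup_fresh
          (fun (acc : List (List (Option Int))) suffix =>
            if none :: suffix ∈ acc then acc else acc ++ [none :: suffix])
          (fun s => (none : Option Int) :: s) (fun _ _ hm => if_neg hm)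
          (generalize_alt rest (n-1)) []
          (by
            simp only [List.nil_append]
            exact ((gen2_nodup rest (n-1) (by omega)).map
              (fun a b h => by simpa using h))),
        List.nil_append]
    rw [foldl_dedup_fresh
          (fun (acc : List (List (Option Int))) suffix =>
            if some x :: suffix ∈ acc then acc else acc ++ [some x :: suffix])
          (fun s => some x :: s) (fun _ _ hm => if_neg hm)
          (generalize_alt rest n)
          ((generalize_alt rest (n-1)).map (fun s => (none : Option Int) :: s))
          (by rw [show ((generalize_alt rest (n-1)).map (fun s => (none : Option Int) :: s) ++
                  (generalize_alt rest n).map (fun s => some x :: s)) =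
                generalize_alt (x :: rest) n from hcons.symm]; exact hnd)]
    rw [show ((generalize_alt rest (n-1)).map (fun s => (none : Option Int) :: s) ++
          (generalize_alt rest n).map (fun s => some x :: s)) =
        generalize_alt (x :: rest) n from hcons.symm]
    -- the remaining steps i = 1 .. len-n-1 change nothing
    apply foldl_fixed
    intro i hi
    have hi' : 1 ≤ i ∧ i < ((x :: rest).length : Int) - n := by
      simpa using (PySem.List.mem_pyRange_one.mp hi)
    have hi0 : 0 ≤ i := by omega
    have htn : ((i.toNat : Int)) = i := Int.toNat_of_nonneg hi0
    have hsl1' : PySem.List.slice (x :: rest) (some (i+1)) none = (x :: rest).drop (i.toNat + 1) := by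
      rw [PySem.List.slice_from _ (by omega : (0:Int) ≤ i + 1)]
      congr 1
      omega
    have hsl0' : PySem.List.slice (x :: rest) none (some i) = (x :: rest).take i.toNat := by
      rw [PySem.List.slice_to _ hi0]
    have hget : PySem.List.pyGetD (x :: rest) i 0 = (x :: rest).getD i.toNat 0 := by
      rw [PySem.List.pyGetD_eq_getElem (x :: rest) 0 hi0 (by omega)]
      rw [List.getD_eq_getElem _ _ (by omega)]
    simp only [hsl1', hsl0', hget, ih _ (n-1) (by omega) (hdrop i.toNat), ih _ n hn (hdrop i.toNat)]
    rw [foldl_dedup_absorb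
          (fun (acc : List (List (Option Int))) suffix =>
            if ((x :: rest).take i.toNat).map some ++ none :: suffix ∈ acc then acc
            else acc ++ [((x :: rest).take i.toNat).map some ++ none :: suffix])
          (fun s => ((x :: rest).take i.toNat).map some ++ (none : Option Int) :: s)
          (fun _ _ hm => if_pos hm)
          (generalize_alt ((x :: rest).drop (i.toNat + 1)) (n-1)) (generalize_alt (x :: rest) n)
          (fun s hs => gen2_mem_none i.toNat (x :: rest) n s hn1 (by omega) hs)]
    rw [foldl_dedup_absorb
          (fun (acc : List (List (Option Int))) suffix =>
            if ((x :: rest).take i.toNat).map some ++ some ((x :: rest).getD i.toNat 0) :: suffix ∈ acc then acc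
            else acc ++ [((x :: rest).take i.toNat).map some ++ some ((x :: rest).getD i.toNat 0) :: suffix])
          (fun s => ((x :: rest).take i.toNat).map some ++ some ((x :: rest).getD i.toNat 0) :: s)
          (fun _ _ hm => if_pos hm)
          (generalize_alt ((x :: rest).drop (i.toNat + 1)) n) (generalize_alt (x :: rest) n)
          (fun s hs => gen2_mem_keep i.toNat (x :: rest) n s hn1 (by omega) hs)]

-- ===== VERDICT (by name: the statement is the Claim_ definition above) =====
theorem generalize_spec : Claim_equal_generalize := by
  intro L n _ hpre
  unfold Spec_generalize generalize
  exact genFuelA_eq (L.length + 1) L n hpre (by omega)
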